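-- pv_equiv track=rewrite | github.com/Naomi502/Myrepo | 蓝桥杯比赛试题/第十四届Python大学C组试题/试题B 分糖果.py | count_distributions
-- ===== SOURCE A (Python) =====
-- from itertools import product
--
-- def count_distributions(candies, children, min_candies, max_candies):
--     """
--     计算满足给定条件的糖果分配方案数量
--
--     参数：
--     candies: tuple，表示两种不同类型的糖果数量的元组 (candies1_count, candies2_count)
--     children: int，表示孩子的数量
--     min_candies: int，表示每个孩子至少分配的糖果数量
--     max_candies: int，表示每个孩子最多分配的糖果数量
--
--     返回值：
--     int，满足条件的糖果分配方案数量
--     """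
--     # 生成每种糖果分配给每个孩子的所有可能分配方案
--     all_distributions = product(range(min_candies, max_candies + 1), repeat=children)
--
--     valid_distributions = 0
--
--     for distribution in all_distributions:
--         # 将分配方案分为两种类型的糖果列表
--         for split_index in range(1, children):
--             first_candy_distribution = distribution[:split_index]
--             second_candy_distribution = distribution[split_index:]
--
--             # 检查分配方案是否与给定的糖果数量一致
--             if sum(first_candy_distribution) == candies[0] and sum(second_candy_distribution) == candies[1]:
--                 valid_distributions += 1
--
--     return valid_distributions
-- ===== SOURCE B (Python) =====
-- def count_distributions(candies, children, min_candies, max_candies):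
--     # DP over number of children: ways[k] maps a sum s to the number of
--     # length-k tuples with entries in [min_candies, max_candies] summing to s.
--     if children < 2:
--         return 0
--     c0, c1 = candies[0], candies[1]
--     dp = {0: 1}
--     ways = [dp]
--     for _ in range(1, children):
--         ndp = {}
--         for s, c in dp.items():
--             for v in range(min_candies, max_candies + 1):
--                 ndp[s + v] = ndp.get(s + v, 0) + c
--         dp = ndp
--         ways.append(dp)
--     return sum(ways[k].get(c0, 0) * ways[children - k].get(c1, 0)
--                for k in range(1, children))
-- ===== Notes on version B (the rewrite author's own statement) =====
-- stated objective: alternative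
-- what changed: Replaces brute-force enumeration of all (max-min+1)^children tuples with a dynamic program that counts bounded compositions per sum and multiplies prefix/suffix counts over each split index.
-- outside the precondition, e.g. on count_distributions((100,), 2, 0, 1): A returns 0, B raises IndexError
import Mathlib
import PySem

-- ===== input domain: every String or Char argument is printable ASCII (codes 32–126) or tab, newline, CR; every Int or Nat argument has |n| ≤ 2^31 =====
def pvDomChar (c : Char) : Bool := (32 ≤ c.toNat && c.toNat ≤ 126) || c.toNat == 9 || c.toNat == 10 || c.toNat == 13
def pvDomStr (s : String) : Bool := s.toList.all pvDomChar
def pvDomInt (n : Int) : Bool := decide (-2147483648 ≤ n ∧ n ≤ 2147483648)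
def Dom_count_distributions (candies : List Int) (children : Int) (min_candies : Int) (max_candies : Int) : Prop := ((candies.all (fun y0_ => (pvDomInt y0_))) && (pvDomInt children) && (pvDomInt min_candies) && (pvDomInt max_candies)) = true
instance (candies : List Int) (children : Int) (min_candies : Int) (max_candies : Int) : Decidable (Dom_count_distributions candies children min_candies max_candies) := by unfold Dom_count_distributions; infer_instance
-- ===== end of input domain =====

-- B replaces A's brute-force enumeration of all tuples by a per-sum dynamic program,
-- multiplying prefix/suffix composition counts over each split index (alternative algorithm).

-- ===== PORT A =====
-- itertools.product(range(min,max+1), repeat=n), first coordinate varying slowest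
def pvProd (r : List Int) : Nat → List (List Int)
  | 0 => [[]]
  | n + 1 => r.flatMap (fun x => (pvProd r n).map (fun t => x :: t))

def count_distributions (candies : List Int) (children : Int) (min_candies : Int) (max_candies : Int) : Int :=
  let r := PySem.List.pyRange min_candies (max_candies + 1) 1
  (pvProd r children.toNat).foldl
    (fun acc d =>
      (PySem.List.pyRange 1 children 1).foldl
        (fun acc2 si =>
          let first := PySem.List.slice d none (some si)
          let second := PySem.List.slice d (some si) none
          -- Python's short-circuiting 'and' is the nested if
          if first.sum = PySem.List.pyGetD candies 0 0 then
            if second.sum = PySem.List.pyGetD candies 1 0 then acc2 + 1 else acc2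
          else acc2)
        acc)
    0

-- ===== PORT B =====
def count_distributions_alt (candies : List Int) (children : Int) (min_candies : Int) (max_candies : Int) : Int :=
  if children < 2 then 0
  else
    let c0 := PySem.List.pyGetD candies 0 0
    let c1 := PySem.List.pyGetD candies 1 0
    let st :=
      (PySem.List.pyRange 1 children 1).foldl
        (fun (st : PySem.Dict Int Int × List (PySem.Dict Int Int)) _ =>
          let ndp :=
            st.1.items.foldl
              (fun ndp p =>
                (PySem.List.pyRange min_candies (max_candies + 1) 1).foldl
                  (fun ndp v => ndp.insert (p.1 + v) (ndp.getD (p.1 + v) 0 + p.2))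
                  ndp)
              PySem.Dict.empty
          (ndp, st.2 ++ [ndp]))
        (PySem.Dict.empty.insert 0 1, [PySem.Dict.empty.insert 0 1])
    (PySem.List.pyRange 1 children 1).foldl
      (fun acc k =>
        acc + (PySem.List.pyGetD st.2 k PySem.Dict.empty).getD c0 0 *
              (PySem.List.pyGetD st.2 (children - k) PySem.Dict.empty).getD c1 0)
      0

-- ===== PRECONDITION & SPEC =====
-- Pre_ excludes children < 0, where A raises ValueError (negative 'repeat'), and
-- candies with fewer than two entries when children ≥ 2: there A raises IndexError except
-- in the accidental case that candies[0] matches no prefix sum (A then returns 0), while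
-- B always reads candies[1] and raises.
def Pre_count_distributions (candies : List Int) (children : Int) (min_candies : Int) (max_candies : Int) : Prop :=
  0 ≤ children ∧ (children < 2 ∨ 2 ≤ candies.length)
instance (candies : List Int) (children : Int) (min_candies : Int) (max_candies : Int) : Decidable (Pre_count_distributions candies children min_candies max_candies) := by unfold Pre_count_distributions; infer_instance

def pvWitness_count_distributions : List Int × Int × Int × Int := ([3, 4], 3, 1, 5)

def Spec_count_distributions (candies : List Int) (children : Int) (min_candies : Int) (max_candies : Int) (out : Int) : Prop := out = count_distributions_alt candies children min_candies max_candies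
instance (candies : List Int) (children : Int) (min_candies : Int) (max_candies : Int) (out : Int) : Decidable (Spec_count_distributions candies children min_candies max_candies out) := by unfold Spec_count_distributions; infer_instance

-- ===== CLAIM (what is proved, stated in full; the proofs are below) =====
def Claim_equal_count_distributions : Prop := ∀ (candies : List Int) (children : Int) (min_candies : Int) (max_candies : Int), Dom_count_distributions candies children min_candies max_candies → Pre_count_distributions candies children min_candies max_candies → Spec_count_distributions candies children min_candies max_candies (count_distributions candies children min_candies max_candies)

-- ===== LEMMAS AND PROOFS =====

theorem pvProd_length (r : List Int) (k : Nat) : ∀ d ∈ pvProd r k, d.length = k := by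
  induction k with
  | zero => simp [pvProd]
  | succ n ih =>
    intro d hd
    simp [pvProd] at hd
    obtain ⟨x, hx, t, ht, rfl⟩ := hd
    simp [ih t ht]

theorem pvProd_split (r : List Int) (a b : Nat) :
    pvProd r (a + b) = (pvProd r a).flatMap (fun u => (pvProd r b).map (fun v => u ++ v)) := by
  induction a with
  | zero => simp [pvProd]
  | succ n ih =>
    rw [show n + 1 + b = (n + b) + 1 by omega]
    simp [pvProd, ih, List.map_flatMap, List.flatMap_map, List.flatMap_assoc, List.map_map, Function.comp_def]

theorem pvCountP_flatMap (l : List α) (g : α → List β) (p : β → Bool) :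
    (l.flatMap g).countP p = (l.map (fun x => (g x).countP p)).sum := by
  induction l with
  | nil => simp
  | cons a l ih => simp [List.countP_append, ih]

theorem pvSum_swap (l1 : List α) (l2 : List β) (f : α → β → Int) :
    (l1.map (fun a => (l2.map (fun b => f a b)).sum)).sum
      = (l2.map (fun b => (l1.map (fun a => f a b)).sum)).sum := by
  induction l1 with
  | nil => simp
  | cons a l ih => simp [ih, PySem.List.sum_map_add_int]

theorem pvSum_map_ite (l : List α) (p : α → Bool) (W : Int) :
    (l.map (fun u => if p u then W else 0)).sum = (l.countP p : Int) * W := by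
  induction l with
  | nil => simp
  | cons a l ih =>
    by_cases h : p a <;> simp [h, ih, List.countP_cons] <;> push_cast <;> ring

theorem pvSum_map_eq_count (l : List Int) (a : Int) (c : Int) :
    (l.map (fun x => if x = a then c else 0)).sum = c * (l.count a : Int) := by
  induction l with
  | nil => simp
  | cons x l ih =>
    by_cases h : x = a <;> simp [h, ih, List.count_cons] <;> push_cast <;> ring

def pvCnt (r : List Int) (k : Nat) (s : Int) : Int :=
  ((pvProd r k).countP (fun d => d.sum == s) : Int)

theorem pvCnt_succ (r : List Int) (k : Nat) (t : Int) :
    pvCnt r (k + 1) t = (r.map (fun x => pvCnt r k (t - x))).sum := by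
  unfold pvCnt
  simp only [pvProd, pvCountP_flatMap, List.countP_map]
  push_cast
  rw [List.map_map]
  apply congrArg
  apply List.map_congr_left
  intro x _
  simp only [Function.comp_def]
  norm_cast
  apply List.countP_congr
  intro d _
  simp only [List.sum_cons, beq_iff_eq]
  omega

theorem pvSplit_count (r : List Int) (a b : Nat) (c0 c1 : Int) :
    ((pvProd r (a + b)).countP
        (fun d => (d.take a).sum == c0 && (d.drop a).sum == c1) : Int)
      = pvCnt r a c0 * pvCnt r b c1 := by
  rw [pvProd_split, pvCountP_flatMap]
  push_cast
  rw [List.map_map]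
  have key : ∀ u ∈ pvProd r a,
      ((Nat.cast : Nat → Int) ∘ fun u => ((pvProd r b).map (fun v => u ++ v)).countP
          (fun d => (d.take a).sum == c0 && (d.drop a).sum == c1)) u
        = if u.sum == c0 then pvCnt r b c1 else 0 := by
    intro u hu
    have hlen := pvProd_length r a u hu
    simp only [Function.comp_def, List.countP_map]
    have hcong : ∀ v ∈ pvProd r b,
        (fun v => (List.take a (u ++ v)).sum == c0 && (List.drop a (u ++ v)).sum == c1) v = true
          ↔ ((u.sum == c0 && v.sum == c1) = true) := by
      intro v _
      simp [← hlen, List.take_left, List.drop_left]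
    rw [List.countP_congr hcong]
    by_cases h : u.sum = c0
    · rw [if_pos (by simp [h])]
      unfold pvCnt
      congr 1
      apply List.countP_congr
      intro v _
      simp [h]
    · rw [if_neg (by simp [h])]
      norm_cast
      apply List.countP_eq_zero.mpr
      intro v _
      simp [h]
  rw [List.map_congr_left key, pvSum_map_ite]
  unfold pvCnt
  ring

theorem pvFoldl_flatMap (l : List α) (g : α → List β) (f : γ → β → γ) (init : γ) :
    (l.flatMap g).foldl f init = l.foldl (fun acc a => (g a).foldl f acc) init := by
  induction l generalizing init with
  | nil => rfl
  | cons a l ih => simp [List.foldl_append, ih]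

theorem pvFold_insert_add (L : List (Int × Int)) (d0 : PySem.Dict Int Int) (t : Int) :
    (L.foldl (fun d p => d.insert p.1 (d.getD p.1 0 + p.2)) d0).getD t 0
      = d0.getD t 0 + ((L.filter (fun p => p.1 == t)).map (·.2)).sum := by
  induction L generalizing d0 with
  | nil => simp
  | cons p L ih =>
    simp only [List.foldl_cons, ih, List.filter_cons]
    by_cases h : p.1 = t
    · simp [h, PySem.Dict.getD_insert]; ring
    · have h' : t ≠ p.1 := fun e => h e.symm
      simp [h, h', PySem.Dict.getD_insert]

theorem pvSum_pick (ks : List Int) (hnd : ks.Nodup) (g : Int → Int) (y : Int)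
    (hy : y ∈ ks) : (ks.map (fun k => if k = y then g k else 0)).sum = g y := by
  induction ks with
  | nil => simp at hy
  | cons k ks ih =>
    simp only [List.map_cons, List.sum_cons]
    rcases List.mem_cons.mp hy with heq | hy'
    · rw [if_pos heq.symm]
      have hz0 : ∀ x ∈ ks.map (fun x => if x = y then g x else 0), x = 0 := by
        intro x hx
        obtain ⟨z, hz, rfl⟩ := List.mem_map.mp hx
        have hzy : z ≠ y := fun e => (List.nodup_cons.mp hnd).1 (by rw [← heq, ← e]; exact hz)
        simp [hzy]
      rw [List.sum_eq_zero hz0, heq]; ring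
    · rw [if_neg (show ¬ k = y from fun e => (List.nodup_cons.mp hnd).1 (by rw [e]; exact hy')),
          ih (List.nodup_cons.mp hnd).2 hy']
      ring

def pvStep (r : List Int) (dp : PySem.Dict Int Int) : PySem.Dict Int Int :=
  dp.items.foldl
    (fun ndp p => r.foldl (fun ndp v => ndp.insert (p.1 + v) (ndp.getD (p.1 + v) 0 + p.2)) ndp)
    PySem.Dict.empty

theorem pvStep_eq_flat (r : List Int) (dp : PySem.Dict Int Int) :
    pvStep r dp
      = (dp.items.flatMap (fun p => r.map (fun v => (p.1 + v, p.2)))).foldl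
          (fun d q => d.insert q.1 (d.getD q.1 0 + q.2)) PySem.Dict.empty := by
  rw [pvFoldl_flatMap]
  unfold pvStep
  congr 1
  funext d p
  rw [List.foldl_map]

theorem pvStep_nodup (r : List Int) (dp : PySem.Dict Int Int) :
    (pvStep r dp).keys.Nodup := by
  rw [pvStep_eq_flat]
  exact PySem.Dict.nodup_keys_foldl_insert_key _ (fun (q : Int × Int) => q.1)
    (fun d (q : Int × Int) => d.getD q.1 0 + q.2) _ (by simp [PySem.Dict.keys_empty])

theorem pvStep_getD (r : List Int) (dp : PySem.Dict Int Int)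
    (hnd : dp.keys.Nodup) (t : Int) :
    (pvStep r dp).getD t 0 = (r.map (fun x => dp.getD (t - x) 0)).sum := by
  rw [pvStep_eq_flat, pvFold_insert_add, PySem.Dict.getD_empty]
  have lhs : ∀ (its : List (Int × Int)),
      (((its.flatMap (fun p => r.map (fun v => (p.1 + v, p.2)))).filter
          (fun (q : Int × Int) => q.1 == t)).map (·.2)).sum
        = (its.map (fun p => p.2 * (r.count (t - p.1) : Int))).sum := by
    intro its
    induction its with
    | nil => simp
    | cons p its ih =>
      simp only [List.flatMap_cons, List.filter_append, List.map_append, List.sum_append, ih,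
        List.map_cons, List.sum_cons]
      congr 1
      rw [List.filter_map, List.map_map]
      have hpred : (fun q => q.1 == t) ∘ (fun v => ((p.1 + v, p.2) : Int × Int))
          = fun v => v == t - p.1 := by
        funext v
        simp only [Function.comp_def]
        by_cases h : p.1 + v = t
        · simp [h]; omega
        · have h2 : ¬ v = t - p.1 := by omega
          simp [h, h2]
      rw [hpred]
      have hconst : ((r.filter (fun v => v == t - p.1)).map
            ((·.2) ∘ fun v => ((p.1 + v, p.2) : Int × Int))).sum
          = ((r.filter (fun v => v == t - p.1)).map (fun _ => p.2)).sum := rfl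
      rw [hconst, PySem.List.sum_map_const_int, ← List.countP_eq_length_filter]
      have : r.countP (fun v => v == t - p.1) = r.count (t - p.1) := rfl
      rw [this]; ring
  rw [lhs, zero_add]
  -- rewrite items via keys, then Fubini
  rw [PySem.Dict.items_eq_map_keys dp hnd 0, List.map_map]
  have rhs : ∀ x, dp.getD (t - x) 0
      = (dp.keys.map (fun k => if k = t - x then dp.getD k 0 else 0)).sum := by
    intro x
    by_cases hx : (t - x) ∈ dp.keys
    · exact (pvSum_pick dp.keys hnd (fun k => dp.getD k 0) (t - x) hx).symm
    · have h0 : dp.getD (t - x) 0 = 0 := by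
        apply PySem.Dict.getD_of_not_contains
        rw [PySem.Dict.contains_eq_decide_mem_keys]
        simp [hx]
      rw [h0]
      symm
      apply List.sum_eq_zero
      intro z hz
      obtain ⟨k, hk, rfl⟩ := List.mem_map.mp hz
      rw [if_neg (fun e => hx (by rw [← e]; exact hk))]
  calc (dp.keys.map ((fun p => p.2 * (r.count (t - p.1) : Int))
            ∘ fun k => (k, dp.getD k 0))).sum
      = (dp.keys.map (fun k => (r.map (fun x =>
            if k = t - x then dp.getD k 0 else 0)).sum)).sum := by
        apply congrArg
        apply List.map_congr_left
        intro k _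
        simp only [Function.comp_def]
        have : (r.map (fun x => if k = t - x then dp.getD k 0 else 0))
            = (r.map (fun x => if x = t - k then dp.getD k 0 else 0)) := by
          apply List.map_congr_left
          intro x _
          exact if_congr (by omega) rfl rfl
        rw [this, pvSum_map_eq_count]
    _ = (r.map (fun x => (dp.keys.map (fun k =>
            if k = t - x then dp.getD k 0 else 0)).sum)).sum := (pvSum_swap _ _ _).symm
    _ = (r.map (fun x => dp.getD (t - x) 0)).sum := by
        apply congrArg
        apply List.map_congr_left
        intro x _
        exact (rhs x).symm

def pvDps (r : List Int) : Nat → PySem.Dict Int Int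
  | 0 => PySem.Dict.empty.insert 0 1
  | k + 1 => pvStep r (pvDps r k)

theorem pvDps_nodup (r : List Int) (k : Nat) : (pvDps r k).keys.Nodup := by
  cases k with
  | zero =>
    show (PySem.Dict.empty.insert 0 1).keys.Nodup
    exact PySem.Dict.nodup_keys_insert _ _ _ (by simp [PySem.Dict.keys_empty])
  | succ n => exact pvStep_nodup _ _

theorem pvDps_getD (r : List Int) (k : Nat) (t : Int) :
    (pvDps r k).getD t 0 = pvCnt r k t := by
  induction k generalizing t with
  | zero =>
    show (PySem.Dict.empty.insert 0 1).getD t 0 = pvCnt r 0 t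
    rw [PySem.Dict.getD_insert]
    unfold pvCnt pvProd
    by_cases h : t = 0
    · simp [h]
    · simp [h, Ne.symm h]
  | succ n ih =>
    show (pvStep r (pvDps r n)).getD t 0 = pvCnt r (n + 1) t
    rw [pvStep_getD r _ (pvDps_nodup r n), pvCnt_succ]
    apply congrArg
    apply List.map_congr_left
    intro x _
    exact ih (t - x)

theorem pvDps_eq_iter (r : List Int) (k : Nat) :
    pvDps r k = (pvStep r)^[k] (PySem.Dict.empty.insert 0 1) := by
  induction k with
  | zero => rfl
  | succ n ih =>
    show pvStep r (pvDps r n) = _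
    rw [ih, Function.iterate_succ_apply']

theorem pvFold_iter (l : List Int) (f : PySem.Dict Int Int → PySem.Dict Int Int)
    (d : PySem.Dict Int Int) (w : List (PySem.Dict Int Int)) :
    l.foldl (fun (st : PySem.Dict Int Int × List (PySem.Dict Int Int)) _ =>
        (f st.1, st.2 ++ [f st.1])) (d, w)
      = (f^[l.length] d, w ++ (List.range l.length).map (fun i => f^[i + 1] d)) := by
  induction l generalizing d w with
  | nil => simp
  | cons a l ih =>
    simp only [List.foldl_cons, ih, List.length_cons]
    refine Prod.ext ?_ ?_
    · exact (Function.iterate_succ_apply f l.length d).symm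
    · show w ++ [f d] ++ _ = w ++ _
      rw [List.append_assoc]
      apply congrArg
      rw [List.range_succ_eq_map, List.map_cons, List.map_map]
      apply congrArg
      apply List.map_congr_left
      intro i _
      simp only [Function.comp_def, Nat.succ_eq_add_one]
      exact (Function.iterate_succ_apply f (i + 1) d).symm

theorem pvSum_ite_prop {α : Type} (l : List α) (p : α → Prop) [DecidablePred p] :
    (l.map (fun x => if p x then (1 : Int) else 0)).sum
      = (l.countP (fun x => decide (p x)) : Int) := by
  rw [← PySem.List.sum_map_ite_one_zero (fun x => decide (p x)) l]
  apply congrArg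
  apply List.map_congr_left
  intro x _
  simp

theorem main_eq (candies : List Int) (children : Int) (min_candies : Int) (max_candies : Int) :
    count_distributions candies children min_candies max_candies
      = count_distributions_alt candies children min_candies max_candies := by
  by_cases hch : children < 2
  · rw [count_distributions_alt, if_pos hch]
    rw [count_distributions]
    rw [PySem.List.pyRange_one_eq_nil (show children ≤ 1 by omega)]
    simp only [List.foldl_nil]
    exact PySem.List.foldl_ignore _ _
  · have hA : count_distributions candies children min_candies max_candies
        = ((PySem.List.pyRange 1 children 1).map (fun si =>
            pvCnt (PySem.List.pyRange min_candies (max_candies + 1) 1) si.toNat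
                (PySem.List.pyGetD candies 0 0)
              * pvCnt (PySem.List.pyRange min_candies (max_candies + 1) 1) (children - si).toNat
                (PySem.List.pyGetD candies 1 0))).sum := by
      set r := PySem.List.pyRange min_candies (max_candies + 1) 1 with hr
      set c0 := PySem.List.pyGetD candies 0 0 with hc0
      set c1 := PySem.List.pyGetD candies 1 0 with hc1
      have hbody : ∀ (d : List Int),
          (fun (acc2 : Int) (si : Int) =>
            let first := PySem.List.slice d none (some si)
            let second := PySem.List.slice d (some si) none
            if first.sum = c0 then
              if second.sum = c1 then acc2 + 1 else acc2
            else acc2)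
          = fun (acc2 : Int) (si : Int) =>
              if (PySem.List.slice d none (some si)).sum = c0 ∧
                 (PySem.List.slice d (some si) none).sum = c1 then acc2 + 1 else acc2 := by
        intro d
        funext acc2 si
        by_cases h1 : (PySem.List.slice d none (some si)).sum = c0 <;>
          by_cases h2 : (PySem.List.slice d (some si) none).sum = c1 <;>
          simp [h1, h2]
      calc count_distributions candies children min_candies max_candies
          = (pvProd r children.toNat).foldl
              (fun acc d =>
                (PySem.List.pyRange 1 children 1).foldl
                  (fun (acc2 : Int) (si : Int) =>
                    if (PySem.List.slice d none (some si)).sum = c0 ∧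
                       (PySem.List.slice d (some si) none).sum = c1 then acc2 + 1 else acc2)
                  acc)
              0 := by
            rw [count_distributions]
            apply PySem.List.foldl_congr_mem
            intro acc d _
            exact congrArg
              (fun ff => List.foldl ff acc (PySem.List.pyRange 1 children 1)) (hbody d)
        _ = ((pvProd r children.toNat).map (fun d =>
              ((PySem.List.pyRange 1 children 1).countP (fun si =>
                decide ((PySem.List.slice d none (some si)).sum = c0 ∧
                  (PySem.List.slice d (some si) none).sum = c1)) : Int))).sum := by
            simp only [PySem.List.foldl_ite_add_one]
            rw [PySem.List.foldl_add (pvProd r children.toNat) _ 0, zero_add]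
        _ = ((pvProd r children.toNat).map (fun d =>
              ((PySem.List.pyRange 1 children 1).map (fun si =>
                if (PySem.List.slice d none (some si)).sum = c0 ∧
                   (PySem.List.slice d (some si) none).sum = c1 then (1 : Int) else 0)).sum)).sum := by
            apply congrArg
            apply List.map_congr_left
            intro d _
            exact (pvSum_ite_prop (PySem.List.pyRange 1 children 1)
              (fun si => (PySem.List.slice d none (some si)).sum = c0 ∧
                (PySem.List.slice d (some si) none).sum = c1)).symm
        _ = ((PySem.List.pyRange 1 children 1).map (fun si =>
              pvCnt r si.toNat c0 * pvCnt r (children - si).toNat c1)).sum := by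
            rw [pvSum_swap]
            apply congrArg
            apply List.map_congr_left
            intro si hsi
            have hb := PySem.List.mem_pyRange_one.mp hsi
            rw [pvSum_ite_prop (pvProd r children.toNat)
              (fun d => (PySem.List.slice d none (some si)).sum = c0 ∧
                (PySem.List.slice d (some si) none).sum = c1)]
            have hcong : ∀ d ∈ pvProd r children.toNat,
                (decide ((PySem.List.slice d none (some si)).sum = c0 ∧
                  (PySem.List.slice d (some si) none).sum = c1)) = true
                ↔ ((d.take si.toNat).sum == c0 && (d.drop si.toNat).sum == c1) = true := by
              intro d _
              rw [PySem.List.slice_to d (by omega), PySem.List.slice_from d (by omega)]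
              simp
            rw [List.countP_congr hcong]
            rw [show (pvProd r children.toNat)
                = pvProd r (si.toNat + (children - si).toNat) by congr 1; omega]
            exact pvSplit_count r si.toNat (children - si).toNat c0 c1
    have hB : count_distributions_alt candies children min_candies max_candies
        = ((PySem.List.pyRange 1 children 1).map (fun si =>
            pvCnt (PySem.List.pyRange min_candies (max_candies + 1) 1) si.toNat
                (PySem.List.pyGetD candies 0 0)
              * pvCnt (PySem.List.pyRange min_candies (max_candies + 1) 1) (children - si).toNat
                (PySem.List.pyGetD candies 1 0))).sum := by
      set r := PySem.List.pyRange min_candies (max_candies + 1) 1 with hr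
      set c0 := PySem.List.pyGetD candies 0 0 with hc0
      set c1 := PySem.List.pyGetD candies 1 0 with hc1
      rw [count_distributions_alt, if_neg hch]
      show ((PySem.List.pyRange 1 children 1).foldl
          (fun acc k =>
            acc + (PySem.List.pyGetD
                ((PySem.List.pyRange 1 children 1).foldl
                  (fun (st : PySem.Dict Int Int × List (PySem.Dict Int Int)) (_ : Int) =>
                    (pvStep r st.1, st.2 ++ [pvStep r st.1]))
                  (PySem.Dict.empty.insert 0 1, [PySem.Dict.empty.insert 0 1])).2
                k PySem.Dict.empty).getD c0 0 *
              (PySem.List.pyGetD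
                ((PySem.List.pyRange 1 children 1).foldl
                  (fun (st : PySem.Dict Int Int × List (PySem.Dict Int Int)) (_ : Int) =>
                    (pvStep r st.1, st.2 ++ [pvStep r st.1]))
                  (PySem.Dict.empty.insert 0 1, [PySem.Dict.empty.insert 0 1])).2
                (children - k) PySem.Dict.empty).getD c1 0)
          0) = _
      rw [pvFold_iter]
      set m := (PySem.List.pyRange 1 children 1).length with hm
      have hmval : m = (children - 1).toNat := by
        rw [hm, PySem.List.length_pyRange_one]
      have hways : ([PySem.Dict.empty.insert 0 1] ++
            (List.range m).map (fun i => (pvStep r)^[i + 1] (PySem.Dict.empty.insert 0 1)) :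
              List (PySem.Dict Int Int))
          = (List.range (m + 1)).map (fun i => pvDps r i) := by
        rw [List.range_succ_eq_map, List.map_cons, List.map_map, List.singleton_append]
        congr 1
        apply List.map_congr_left
        intro i _
        simp only [Function.comp_def, Nat.succ_eq_add_one]
        exact (pvDps_eq_iter r (i + 1)).symm
      rw [hways]
      rw [PySem.List.foldl_add (PySem.List.pyRange 1 children 1) _ 0, zero_add]
      apply congrArg
      apply List.map_congr_left
      intro k hk
      have hb := PySem.List.mem_pyRange_one.mp hk
      have h1 : PySem.List.pyGetD ((List.range (m + 1)).map (fun i => pvDps r i)) k PySem.Dict.empty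
          = pvDps r k.toNat := by
        rw [PySem.List.pyGetD_of_nonneg _ _ (by omega)]
        exact PySem.List.getD_map_range (fun i => pvDps r i) (m + 1) k.toNat _ (by omega)
      have h2 : PySem.List.pyGetD ((List.range (m + 1)).map (fun i => pvDps r i)) (children - k) PySem.Dict.empty
          = pvDps r (children - k).toNat := by
        rw [PySem.List.pyGetD_of_nonneg _ _ (by omega)]
        exact PySem.List.getD_map_range (fun i => pvDps r i) (m + 1) (children - k).toNat _ (by omega)
      rw [h1, h2, pvDps_getD, pvDps_getD]
    rw [hA, hB]

-- ===== VERDICT (by name: the statement is the Claim_ definition above) =====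
theorem count_distributions_spec : Claim_equal_count_distributions := by
  intro candies children min_candies max_candies _ _
  exact main_eq candies children min_candies max_candies
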